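-- pv_equiv track=rewrite | github.com/gitpdg/PSC | MATSim_preparation/plans_generation.py | fix_schedule
-- ===== SOURCE A (Python) =====
-- def fix_schedule(person):
--     #When the origin of a trip isn't known, it is set at None. This function fixes this
--     #issue and verifies that a schedule is coherent.
--     person2=[]
--     for trip in person:
--         person2.append([item for item in trip])
--     if len(person2)!=0:
--         person2[0][0]="home"
--     for i in range(1,len(person2)):
--         person2[i][0]=person2[i-1][3]
--     person=[tuple(trip) for trip in person2]
--     return person
-- ===== SOURCE B (Python) =====
-- def fix_schedule(person):
--     # Divide and conquer: fix each half independently; the right half's first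
--     # origin is the last destination of the left half. Depth O(log n).
--     def solve(origin, trips):
--         n = len(trips)
--         if n == 0:
--             return []
--         if n == 1:
--             return [(origin,) + tuple(trips[0])[1:]]
--         mid = n // 2
--         return solve(origin, trips[:mid]) + solve(trips[mid - 1][3], trips[mid:])
--     return solve("home", person)
-- ===== Notes on version B (the rewrite author's own statement) =====
-- stated objective: alternative
-- what changed: Replaces A's copy-to-mutable-lists then in-place index-lookback mutation pass with a divide-and-conquer recursion that fixes each half independently, seeding the right half's origin with the left half's last destination.
import Mathlib
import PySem

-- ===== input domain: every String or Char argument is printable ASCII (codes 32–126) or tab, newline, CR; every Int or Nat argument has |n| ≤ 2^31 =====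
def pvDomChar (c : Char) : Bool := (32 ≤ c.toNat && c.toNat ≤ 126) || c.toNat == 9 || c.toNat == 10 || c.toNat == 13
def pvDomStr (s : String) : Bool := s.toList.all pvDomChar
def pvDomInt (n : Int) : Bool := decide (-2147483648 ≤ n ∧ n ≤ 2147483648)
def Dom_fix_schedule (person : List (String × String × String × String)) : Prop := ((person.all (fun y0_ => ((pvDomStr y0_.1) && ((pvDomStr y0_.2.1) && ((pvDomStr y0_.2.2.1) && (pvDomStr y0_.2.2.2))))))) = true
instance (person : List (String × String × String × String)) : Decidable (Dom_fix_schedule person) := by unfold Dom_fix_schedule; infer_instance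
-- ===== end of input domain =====

-- B replaces A's copy-then-mutate-in-place two-pass scheme with a divide-and-conquer
-- recursion (fix each half; the right half's origin is the left half's last destination).

-- ===== PORT A =====
-- port of A: copy every trip, set person2[0][0]="home", then person2[i][0]=person2[i-1][3]
def fix_schedule (person : List (String × String × String × String)) : List (String × String × String × String) :=
  let person2 := person.map (fun trip => trip)
  let person2 :=
    if person2.length ≠ 0 then
      match PySem.List.pyGet? person2 0 with
      | some t0 => person2.set 0 ("home", t0.2.1, t0.2.2.1, t0.2.2.2)
      | none => person2
    else person2
  let person2 := (PySem.List.pyRange 1 person2.length 1).foldl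
    (fun acc i =>
      match PySem.List.pyGet? acc (i - 1), PySem.List.pyGet? acc i with
      | some prev, some cur => PySem.List.pySetD acc i (prev.2.2.2, cur.2.1, cur.2.2.1, cur.2.2.2)
      | _, _ => acc) person2
  person2.map (fun trip => trip)

-- ===== PORT B =====
-- solve(origin, trips): divide and conquer over the trip list
def fsAltSolve (origin : String) (trips : List (String × String × String × String)) :
    List (String × String × String × String) :=
  let n := trips.length
  if n = 0 then []
  else if n = 1 then
    match PySem.List.pyGet? trips 0 with
    | some t => [(origin, t.2.1, t.2.2.1, t.2.2.2)]
    | none => []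
  else
    let mid := n / 2
    fsAltSolve origin (PySem.List.slice trips none (some (mid : Int))) ++
    (match PySem.List.pyGet? trips ((mid : Int) - 1) with
     | some p => fsAltSolve p.2.2.2 (PySem.List.slice trips (some (mid : Int)) none)
     | none => [])
termination_by trips.length
decreasing_by
  · simp only [PySem.List.slice_to_natCast, List.length_take]; omega
  · simp only [PySem.List.slice_from_natCast, List.length_drop]; omega

def fix_schedule_alt (person : List (String × String × String × String)) : List (String × String × String × String) :=
  fsAltSolve "home" person

-- ===== PRECONDITION & SPEC =====
def Spec_fix_schedule (person : List (String × String × String × String)) (out : List (String × String × String × String)) : Prop := out = fix_schedule_alt person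
instance (person : List (String × String × String × String)) (out : List (String × String × String × String)) : Decidable (Spec_fix_schedule person out) := by unfold Spec_fix_schedule; infer_instance

-- ===== CLAIM =====
def Claim_equal_fix_schedule : Prop := ∀ (person : List (String × String × String × String)), Dom_fix_schedule person → Spec_fix_schedule person (fix_schedule person)

-- ===== LEMMAS AND PROOFS =====

-- the common normal form: each trip's origin becomes the carried origin, then the trip's destination is carried on
def pvChain (origin : String) :
    List (String × String × String × String) → List (String × String × String × String)
  | [] => []
  | c :: rest => (origin, c.2.1, c.2.2.1, c.2.2.2) :: pvChain c.2.2.2 rest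

-- the origin carried after processing xs starting from o
def pvCarry (o : String) (xs : List (String × String × String × String)) : String :=
  (xs.getLast?).elim o (fun t => t.2.2.2)

theorem pvCarry_cons (o : String) (x : String × String × String × String)
    (rest : List (String × String × String × String)) :
    pvCarry o (x :: rest) = pvCarry x.2.2.2 rest := by
  cases rest with
  | nil => rfl
  | cons c r =>
    simp only [pvCarry, List.getLast?_cons_cons]
    cases h : (c :: r).getLast? with
    | none => simp [List.getLast?_eq_none_iff] at h
    | some t => rfl

theorem pvChain_append (o : String) (xs ys : List (String × String × String × String)) :
    pvChain o (xs ++ ys) = pvChain o xs ++ pvChain (pvCarry o xs) ys := by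
  induction xs generalizing o with
  | nil => simp [pvChain, pvCarry]
  | cons x rest ih =>
    simp only [List.cons_append, pvChain, ih x.2.2.2, pvCarry_cons, List.cons_append]

theorem pvSolve_eq_chain (origin : String) (trips : List (String × String × String × String)) :
    fsAltSolve origin trips = pvChain origin trips := by
  rw [fsAltSolve]
  by_cases h0 : trips.length = 0
  · rw [List.length_eq_zero_iff.mp h0]; rfl
  · by_cases h1 : trips.length = 1
    · obtain ⟨t, rfl⟩ : ∃ t, trips = [t] := List.length_eq_one_iff.mp h1
      simp [PySem.List.pyGet?, PySem.List.pyIdx?, pvChain]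
    · have hn2 : 2 ≤ trips.length := by omega
      have hmid1 : 1 ≤ trips.length / 2 := by omega
      have hmidlt : trips.length / 2 < trips.length := by omega
      simp only [if_neg h0, if_neg h1]
      rw [PySem.List.slice_to_natCast, PySem.List.slice_from_natCast]
      have hidx : ((trips.length / 2 : Nat) : Int) - 1 = ((trips.length / 2 - 1 : Nat) : Int) := by
        push_cast [hmid1]; ring
      rw [hidx, PySem.List.pyGet?_natCast]
      have hget : trips[trips.length / 2 - 1]? = some trips[trips.length / 2 - 1] :=
        List.getElem?_eq_getElem (by omega)
      have hrecL := pvSolve_eq_chain origin (trips.take (trips.length / 2))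
      have hrecR := pvSolve_eq_chain trips[trips.length / 2 - 1].2.2.2 (trips.drop (trips.length / 2))
      rw [hget]
      simp only [hrecL, hrecR]
      have hsplit := pvChain_append origin (trips.take (trips.length / 2)) (trips.drop (trips.length / 2))
      rw [List.take_append_drop] at hsplit
      have hcarry : pvCarry origin (trips.take (trips.length / 2)) = trips[trips.length / 2 - 1].2.2.2 := by
        unfold pvCarry
        rw [List.getLast?_take, if_neg (by omega), hget]
        rfl
      rw [hsplit, hcarry]
termination_by trips.length
decreasing_by
  · simp only [List.length_take]; omega
  · simp only [List.length_drop]; omega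

def pvStep (acc : List (String × String × String × String)) (i : Int) :
    List (String × String × String × String) :=
  match PySem.List.pyGet? acc (i - 1), PySem.List.pyGet? acc i with
  | some prev, some cur => PySem.List.pySetD acc i (prev.2.2.2, cur.2.1, cur.2.2.1, cur.2.2.2)
  | _, _ => acc

theorem pvLoop_inv (post : List (String × String × String × String)) :
    ∀ (pre : List (String × String × String × String)) (prev : String × String × String × String),
    (PySem.List.pyRange (pre.length + 1) (pre.length + 1 + post.length) 1).foldl pvStep
      (pre ++ prev :: post) = pre ++ prev :: pvChain prev.2.2.2 post := by
  induction post with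
  | nil => intro pre prev; simp [PySem.List.pyRange_one_eq_nil, pvChain]
  | cons c rest ih =>
    intro pre prev
    have hcons : PySem.List.pyRange ((pre.length : Int) + 1) ((pre.length : Int) + 1 + (c :: rest).length) 1
        = ((pre.length : Int) + 1) :: PySem.List.pyRange ((pre.length : Int) + 1 + 1) ((pre.length : Int) + 1 + (c :: rest).length) 1 := by
      apply PySem.List.pyRange_one_cons; simp
    rw [hcons, List.foldl_cons]
    have hstep : pvStep (pre ++ prev :: c :: rest) ((pre.length : Int) + 1)
        = (pre ++ [prev]) ++ (prev.2.2.2, c.2.1, c.2.2.1, c.2.2.2) :: rest := by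
      unfold pvStep
      have h1 : PySem.List.pyGet? (pre ++ prev :: c :: rest) ((pre.length : Int) + 1 - 1) = some prev := by
        rw [show ((pre.length : Int) + 1 - 1) = ((pre.length : Nat) : Int) from by ring]
        exact PySem.List.pyGet?_append_length ..
      have h2 : PySem.List.pyGet? (pre ++ prev :: c :: rest) ((pre.length : Int) + 1) = some c := by
        have := PySem.List.pyGet?_append_right pre (prev :: c :: rest) 1
        simpa using this
      rw [h1, h2]
      have h3 : ((pre.length : Int) + 1) = ((pre.length + 1 : Nat) : Int) := by push_cast; ring
      simp only [h3, PySem.List.pySetD_natCast]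
      rw [List.set_append_right _ _ (by omega)]
      simp
    rw [hstep]
    have harr : (PySem.List.pyRange ((pre.length : Int) + 1 + 1) ((pre.length : Int) + 1 + (c :: rest).length) 1)
        = PySem.List.pyRange (((pre ++ [prev]).length : Int) + 1) (((pre ++ [prev]).length : Int) + 1 + (rest.length : Int)) 1 := by
      simp; congr 1; omega
    rw [harr, ih (pre ++ [prev]) (prev.2.2.2, c.2.1, c.2.2.1, c.2.2.2)]
    simp [pvChain]

-- ===== VERDICT (by name: the statement is the Claim_ definition above) =====
theorem fix_schedule_spec : Claim_equal_fix_schedule := by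
  intro person _
  unfold Spec_fix_schedule fix_schedule fix_schedule_alt
  rw [pvSolve_eq_chain]
  cases person with
  | nil => rfl
  | cons h t =>
    simp only [List.map_id', List.length_cons, ne_eq]
    rw [if_pos (by simp), PySem.List.pyGet?_zero_cons]
    simp only [List.set_cons_zero]
    have hinv := pvLoop_inv t [] ("home", h.2.1, h.2.2.1, h.2.2.2)
    simp only [List.length_nil, Nat.cast_zero, zero_add, List.nil_append] at hinv
    show (PySem.List.pyRange 1 (((("home", h.2.1, h.2.2.1, h.2.2.2) :: t).length : Nat) : Int) 1).foldl
      pvStep (("home", h.2.1, h.2.2.1, h.2.2.2) :: t) = _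
    have hb : (((("home", h.2.1, h.2.2.1, h.2.2.2) :: t).length : Nat) : Int) = 1 + (t.length : Int) := by
      simp; omega
    rw [hb, hinv]
    rfl
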